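-- pv_equiv track=rewrite | github.com/Almas-Ali/Hacktoberfest_Pattern_Making | Python/floyd_triangle.py | calculate_width_of_triangle
-- ===== SOURCE A (Python) =====
-- def calculate_width_of_triangle(rows: int):
--     last_row = rows - 1
--     last_row_start_num = (pow(last_row, 2) + last_row + 2)//2
--     last_row_end_num = last_row_start_num + rows
--     width = 0
--     for i in range(last_row_start_num, last_row_end_num+1):
--         width += len(str(i)) + 1
--     width -= 2
--     return width
-- ===== SOURCE B (Python) =====
-- def calculate_width_of_triangle(rows: int):
--     last_row = rows - 1
--     first = (last_row * last_row + last_row + 2) // 2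
--     last = first + rows
--     # one separator unit per number, plus digit counts summed band by band
--     total = last - first + 1
--     lo, p, d = first, 1, 1
--     while p <= last:
--         hi = min(last, p * 10 - 1)
--         if lo <= hi:
--             total += d * (hi - lo + 1)
--             lo = hi + 1
--         p *= 10
--         d += 1
--     return total - 2
-- ===== Notes on version B (the rewrite author's own statement) =====
-- stated objective: faster
-- what changed: Replaces A's per-number loop summing len(str(i))+1 over the whole last row with an O(log rows) sweep over powers-of-ten bands (digit-count times band-size per band plus a closed-form count term); Pre_ excludes negative row counts, nonsense inputs outside a triangle's natural domain, on which the two natural algorithms give different values.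
-- outside the precondition, e.g. on calculate_width_of_triangle(-5): A returns -2, B returns -6
import Mathlib
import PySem

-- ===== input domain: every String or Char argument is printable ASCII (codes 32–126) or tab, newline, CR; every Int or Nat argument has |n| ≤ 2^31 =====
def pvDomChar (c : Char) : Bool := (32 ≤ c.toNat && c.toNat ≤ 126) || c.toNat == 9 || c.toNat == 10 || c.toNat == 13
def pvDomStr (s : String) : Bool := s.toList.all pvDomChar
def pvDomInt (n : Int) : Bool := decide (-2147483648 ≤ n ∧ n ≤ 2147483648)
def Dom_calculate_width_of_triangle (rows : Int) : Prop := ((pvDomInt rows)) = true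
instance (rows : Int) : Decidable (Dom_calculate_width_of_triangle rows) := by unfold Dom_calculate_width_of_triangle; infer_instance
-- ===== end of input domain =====

-- B replaces A's per-number O(rows) loop by an O(log rows) sweep over powers-of-ten bands;
-- Pre_ restricts to the natural domain rows ≥ 0 (a triangle cannot have negative rows).

-- ===== PORT A =====
-- for i in range(start, end+1): width += len(str(i)) + 1    (len(str(i)) = number of code points of str(i))
def calculate_width_of_triangle (rows : Int) : Int :=
  let last_row := rows - 1
  let last_row_start_num := PySem.Int.floordiv (last_row ^ 2 + last_row + 2) 2
  let last_row_end_num := last_row_start_num + rows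
  let width :=
    (PySem.List.pyRange last_row_start_num (last_row_end_num + 1) 1).foldl
      (fun width i => width + PySem.Chars.len (PySem.Int.toChars i) + 1) 0
  width - 2

-- ===== PORT B =====
-- the while loop of Source B; `hp : 1 ≤ p` only justifies termination (p always starts at 1)
def pvBandLoop (last total lo p d : Int) (hp : 1 ≤ p) : Int :=
  if hpe : p ≤ last then
    let hi := min last (p * 10 - 1)
    if lo ≤ hi then
      pvBandLoop last (total + d * (hi - lo + 1)) (hi + 1) (p * 10) (d + 1) (by omega)
    else
      pvBandLoop last total lo (p * 10) (d + 1) (by omega)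
  else total
termination_by (last + 1 - p).toNat
decreasing_by all_goals omega

def calculate_width_of_triangle_alt (rows : Int) : Int :=
  let last_row := rows - 1
  let first := PySem.Int.floordiv (last_row * last_row + last_row + 2) 2
  let last := first + rows
  pvBandLoop last (last - first + 1) first 1 1 (by omega) - 2

-- ===== PRECONDITION & SPEC =====
-- Pre_ excludes negative row counts, nonsense inputs outside a triangle's natural domain,
-- on which the two natural algorithms give different values.
def Pre_calculate_width_of_triangle (rows : Int) : Prop := 0 ≤ rows
instance (rows : Int) : Decidable (Pre_calculate_width_of_triangle rows) := by unfold Pre_calculate_width_of_triangle; infer_instance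
def pvWitness_calculate_width_of_triangle : Int := 5

def Spec_calculate_width_of_triangle (rows : Int) (out : Int) : Prop := out = calculate_width_of_triangle_alt rows
instance (rows : Int) (out : Int) : Decidable (Spec_calculate_width_of_triangle rows out) := by unfold Spec_calculate_width_of_triangle; infer_instance

-- ===== CLAIM (what is proved, stated in full; the proofs are below) =====
def Claim_equal_calculate_width_of_triangle : Prop := ∀ (rows : Int), Dom_calculate_width_of_triangle rows → Pre_calculate_width_of_triangle rows → Spec_calculate_width_of_triangle rows (calculate_width_of_triangle rows)

-- ===== LEMMAS AND PROOFS =====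

-- decimal digit count of a positive integer (proof-side abstraction shared by both sides)
def pvDlen (i : Int) : Nat :=
  if h : i < 10 then 1 else pvDlen (i / 10) + 1
termination_by i.toNat
decreasing_by omega

-- sum of digit counts over the integers lo ≤ i < hi
def pvSsum (lo hi : Int) : Int :=
  ((PySem.List.pyRange lo hi 1).map (fun i => (pvDlen i : Int))).sum

lemma pvDlen_small {i : Int} (h : i < 10) : pvDlen i = 1 := by
  rw [pvDlen]; simp [h]

lemma pvDlen_step {i : Int} (h : 10 ≤ i) : pvDlen i = pvDlen (i / 10) + 1 := by
  rw [pvDlen]; simp [show ¬ i < 10 by omega]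

-- constant digit count on the band [10^k, 10^(k+1))
lemma pvDlen_band : ∀ (k : Nat) (i : Int), (10:Int)^k ≤ i → i < (10:Int)^(k+1) → pvDlen i = k + 1 := by
  intro k
  induction k with
  | zero => intro i h1 h2; simp at h1 h2; exact pvDlen_small h2
  | succ k ih =>
    intro i h1 h2
    have hposk : (0:Int) < 10 ^ k := pow_pos (by norm_num) k
    have h10 : (10:Int) ≤ i := by
      have : (10:Int) ^ (k+1) = 10 ^ k * 10 := by ring
      nlinarith
    have hb1 : (10:Int)^k ≤ i / 10 := by
      rw [Int.le_ediv_iff_mul_le (by norm_num)]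
      calc (10:Int)^k * 10 = 10^(k+1) := by ring
        _ ≤ i := h1
    have hb2 : i / 10 < (10:Int)^(k+1) := by
      rw [Int.ediv_lt_iff_lt_mul (by norm_num)]
      calc i < (10:Int)^(k+1+1) := h2
        _ = 10^(k+1) * 10 := by ring
    rw [pvDlen_step h10, ih (i / 10) hb1 hb2]

lemma pvSsum_nil {lo hi : Int} (h : hi ≤ lo) : pvSsum lo hi = 0 := by
  simp [pvSsum, PySem.List.pyRange_one_eq_nil h]

lemma pvSsum_split {lo m hi : Int} (h1 : lo ≤ m) (h2 : m ≤ hi) :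
    pvSsum lo hi = pvSsum lo m + pvSsum m hi := by
  simp [pvSsum, PySem.List.pyRange_one_append lo m hi h1 h2]

-- a band where every element has pvDlen = d sums to d * (its length)
lemma pvSsum_const {lo hi : Int} (d : Nat) (h : ∀ i : Int, lo ≤ i → i < hi → pvDlen i = d) (hle : lo ≤ hi) :
    pvSsum lo hi = (hi - lo) * d := by
  unfold pvSsum
  rw [List.map_congr_left (l := PySem.List.pyRange lo hi 1) (g := fun _ => (d : Int))
    (by intro i hi'; rw [PySem.List.mem_pyRange_one] at hi'
        exact congrArg (Nat.cast : Nat → Int) (h i hi'.1 hi'.2))]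
  rw [PySem.List.sum_map_const_int, PySem.List.length_pyRange_one]
  have hcast : (((hi - lo).toNat : Int)) = hi - lo := by omega
  rw [hcast]

-- main invariant of Source B's band loop
lemma pvBandLoop_eq_aux : ∀ (N : Nat) (last total lo p d : Int) (hp : 1 ≤ p) (k : Nat),
    (last + 1 - p).toNat ≤ N → p = 10^k → d = (k : Int) + 1 → (p ≤ lo ∨ last < lo) → 1 ≤ lo →
    pvBandLoop last total lo p d hp = total + pvSsum lo (last + 1) := by
  intro N
  induction N with
  | zero =>
    intro last total lo p d hp k hN hpk hd hinv hlo1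
    have hpe : ¬ p ≤ last := by omega
    rw [pvBandLoop]
    simp only [hpe, dif_neg, not_false_iff]
    have : last + 1 ≤ lo := by omega
    rw [pvSsum_nil this]; ring
  | succ N ihN =>
    intro last total lo p d hp k hN hpk hd hinv hlo1
    rw [pvBandLoop]
    by_cases hpe : p ≤ last
    · simp only [hpe, dif_pos]
      set hi := min last (p * 10 - 1) with hhi
      by_cases hband : lo ≤ hi
      · simp only [hband, if_pos]
        have hplo : p ≤ lo := by
          rcases hinv with h | h
          · exact h
          · omega
        have hkk : p * 10 = 10^(k+1) := by rw [hpk]; ring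
        have hconst : ∀ i : Int, lo ≤ i → i < hi + 1 → pvDlen i = k + 1 := by
          intro i hi1 hi2
          exact pvDlen_band k i (by omega) (by omega)
        rw [ihN last _ (hi + 1) (p * 10) (d + 1) _ (k + 1) (by omega) hkk
          (by push_cast; omega) (by omega) (by omega)]
        rw [pvSsum_split (lo := lo) (m := hi + 1) (hi := last + 1) (by omega) (by omega),
          pvSsum_const (k + 1) hconst (by omega)]
        rw [hd]
        push_cast
        ring
      · simp only [hband, if_neg, not_false_iff]
        have hkk : p * 10 = 10^(k+1) := by rw [hpk]; ring
        exact ihN last total lo (p * 10) (d + 1) (by omega) (k + 1) (by omega) hkk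
          (by push_cast; omega) (by omega) hlo1
    · simp only [hpe, dif_neg, not_false_iff]
      have : last + 1 ≤ lo := by
        rcases hinv with h | h
        · omega
        · omega
      rw [pvSsum_nil this]; ring

lemma pvBandLoop_eq (last total lo p d : Int) (hp : 1 ≤ p) (k : Nat)
    (hpk : p = 10^k) (hd : d = (k : Int) + 1) (hinv : p ≤ lo ∨ last < lo) (hlo1 : 1 ≤ lo) :
    pvBandLoop last total lo p d hp = total + pvSsum lo (last + 1) :=
  pvBandLoop_eq_aux (last + 1 - p).toNat last total lo p d hp k le_rfl hpk hd hinv hlo1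

-- str(n) for n ≥ 1 has pvDlen n characters
lemma pvToDigitsCore_len : ∀ (f n : Nat), n < f → 0 < n →
    (Nat.toDigitsCore 10 f n []).length = pvDlen n := by
  intro f
  induction f with
  | zero => intro n h _; omega
  | succ f ih =>
    intro n hnf hn
    rw [Nat.toDigitsCore]
    by_cases h10 : n / 10 = 0
    · simp only [h10, if_pos]
      have : (n : Int) < 10 := by omega
      simp [pvDlen_small this]
    · simp only [h10, if_neg, not_false_iff]
      have harg : ((n / 10 : Nat) : Int) = (n : Int) / 10 := by omega
      have h10' : (10:Int) ≤ (n : Int) := by omega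
      rw [Nat.toDigitsCore_lens_eq, ih (n / 10) (by omega) (by omega), harg,
        pvDlen_step h10']

lemma pvToChars_len {i : Int} (h : 1 ≤ i) :
    PySem.Chars.len (PySem.Int.toChars i) = (pvDlen i : Int) := by
  have hneg : ¬ i < 0 := by omega
  rw [PySem.Int.toChars]
  simp only [hneg, if_neg, not_false_iff]
  rw [PySem.Chars.len_eq]
  rw [Nat.toDigits, pvToDigitsCore_len (i.toNat + 1) i.toNat (by omega) (by omega)]
  congr 1
  congr 1
  omega

-- ===== VERDICT (by name: the statement is the Claim_ definition above) =====
theorem calculate_width_of_triangle_spec : Claim_equal_calculate_width_of_triangle := by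
  intro rows _ hpre
  unfold Spec_calculate_width_of_triangle calculate_width_of_triangle calculate_width_of_triangle_alt
  simp only []
  set lr := rows - 1 with hlr
  have hpow : lr ^ 2 = lr * lr := sq lr
  have hnn : 0 ≤ lr * lr + lr := by
    by_cases h : 0 ≤ lr
    · exact add_nonneg (mul_nonneg h h) h
    · have he : lr * lr + lr = lr * (lr + 1) := by ring
      rw [he]
      nlinarith [mul_nonneg (show (0:Int) ≤ -lr by omega) (show (0:Int) ≤ -(lr + 1) by omega)]
  set X := lr * lr + lr + 2 with hX
  have hX2 : 2 ≤ X := by omega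
  have hfd : PySem.Int.floordiv X 2 = X / 2 := PySem.Int.floordiv_eq_ediv_of_pos (by norm_num)
  set s := X / 2 with hs
  have hs1 : 1 ≤ s := by omega
  rw [hpow, hfd]
  set e := s + rows with he
  have hse : s ≤ e := by unfold Pre_calculate_width_of_triangle at hpre; omega
  have hA : (PySem.List.pyRange s (e + 1) 1).foldl
      (fun width i => width + PySem.Chars.len (PySem.Int.toChars i) + 1) 0
      = pvSsum s (e + 1) + (e + 1 - s) := by
    have hfun : (fun (width i : Int) => width + PySem.Chars.len (PySem.Int.toChars i) + 1)
        = fun width i => width + (PySem.Chars.len (PySem.Int.toChars i) + 1) := by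
      funext w i; ring
    rw [hfun, PySem.List.foldl_add]
    rw [List.map_congr_left (l := PySem.List.pyRange s (e+1) 1)
      (g := fun i => (pvDlen i : Int) + 1)
      (by intro i hi'; rw [PySem.List.mem_pyRange_one] at hi'
          rw [pvToChars_len (by omega)])]
    rw [PySem.List.sum_map_add_int, PySem.List.sum_map_const_int,
      PySem.List.length_pyRange_one]
    unfold pvSsum
    omega
  rw [hA, pvBandLoop_eq e (e - s + 1) s 1 1 (by omega) 0 (by norm_num) (by norm_num)
    (Or.inl hs1) hs1]
  omega
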